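-- pv_equiv track=rewrite | github.com/fursovia/adventofcode2020 | day07.py | get_all_parents
-- ===== SOURCE A (Python) =====
-- from typing import Dict, Set, Optional, Union, Tuple
--
-- AdjList = Dict[str, Union[Set[str], Set[Tuple[int, str]]]]
--
-- def get_all_parents(graph: AdjList, start: str, visited: Optional[Set[str]] = None):
--     if visited is None:
--         visited = set()
--     visited.add(start)
--
--     for vertex, nodes in graph.items():
--         if start in nodes:
--             get_all_parents(graph, vertex, visited)
--
--     return visited
-- ===== SOURCE B (Python) =====
-- def get_all_parents(graph, start, visited=None):
--     # Precompute the reverse adjacency list once, then do an explicit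
--     # seen-checked DFS, instead of re-scanning the whole dict at every
--     # (possibly repeated) recursive visit.  Mutates `visited` like the
--     # original (adds the same elements).
--     if visited is None:
--         visited = set()
--     rev = {}
--     for vertex, nodes in graph.items():
--         for n in nodes:
--             rev.setdefault(n, []).append(vertex)
--     seen = set()
--
--     def dfs(v):
--         if v in seen:
--             return
--         seen.add(v)
--         visited.add(v)
--         for p in rev.get(v, []):
--             dfs(p)
--
--     dfs(start)
--     return visited
-- ===== Notes on version B (the rewrite author's own statement) =====
-- stated objective: alternative
-- what changed: A re-walks the graph with an unchecked recursion that scans the whole dict at every (possibly repeated) visit; B builds the reverse adjacency list once and runs a single seen-checked DFS over it.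
import Mathlib
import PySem

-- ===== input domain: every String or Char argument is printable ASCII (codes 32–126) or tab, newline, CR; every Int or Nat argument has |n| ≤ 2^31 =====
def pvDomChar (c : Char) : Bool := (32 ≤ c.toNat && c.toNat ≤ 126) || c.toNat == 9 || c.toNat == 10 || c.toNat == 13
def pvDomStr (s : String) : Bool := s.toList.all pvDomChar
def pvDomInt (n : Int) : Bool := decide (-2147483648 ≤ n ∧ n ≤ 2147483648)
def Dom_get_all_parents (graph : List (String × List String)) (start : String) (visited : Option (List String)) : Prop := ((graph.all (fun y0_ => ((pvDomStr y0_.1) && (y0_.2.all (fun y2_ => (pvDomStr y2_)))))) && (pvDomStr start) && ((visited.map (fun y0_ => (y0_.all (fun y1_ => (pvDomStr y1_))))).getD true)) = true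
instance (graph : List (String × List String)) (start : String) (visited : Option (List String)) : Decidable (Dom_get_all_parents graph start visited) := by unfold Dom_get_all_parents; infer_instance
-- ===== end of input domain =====

-- B precomputes the reverse adjacency list once and runs a single seen-checked DFS
-- instead of A's unchecked recursion that re-scans the whole dict at every visit.
-- Both Pythons mutate the passed-in `visited` set identically; the theorems are about the return value.

-- ===== PORT A =====
-- A's recursion has no visited check, so it does not terminate on graphs with a cycle
-- reachable from `start` (Python: RecursionError). The fuel only makes the port total;
-- under Pre_ it never runs out (recursion depth is bounded by the number of keys + 1).
def pvGoA (graph : List (String × List String)) : Nat → String → List String → List String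
  | 0, _, visited => visited
  | fuel+1, start, visited =>
    let visited1 := PySem.Set.add visited start
    graph.foldl (fun vis p => if p.2.contains start then pvGoA graph fuel p.1 vis else vis) visited1

def get_all_parents (graph : List (String × List String)) (start : String) (visited : Option (List String)) : List String :=
  pvGoA graph (graph.length + 1) start (visited.getD [])

-- ===== PORT B =====
-- reverse adjacency list: for each (vertex, nodes) and n in nodes, append vertex to rev[n]
def pvRev (graph : List (String × List String)) : PySem.Dict String (List String) :=
  graph.foldl (fun d p => p.2.foldl (fun d n => d.modify n [] (fun l => l ++ [p.1])) d) PySem.Dict.empty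

-- seen-checked DFS over the reverse adjacency list; fuel only makes it total
-- (call depth is bounded by the number of distinct keys + 2).
def pvGoB (rev : PySem.Dict String (List String)) : Nat → String → List String × List String → List String × List String
  | 0, _, sv => sv
  | fuel+1, v, (seen, visited) =>
    if seen.contains v then (seen, visited)
    else (rev.getD v []).foldl (fun sv p => pvGoB rev fuel p sv) (PySem.Set.add seen v, PySem.Set.add visited v)

def get_all_parents_alt (graph : List (String × List String)) (start : String) (visited : Option (List String)) : List String :=
  (pvGoB (pvRev graph) (graph.length + 2) start ([], visited.getD [])).2

-- ===== PRECONDITION & SPEC =====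
-- parents ("kids" of the traversal) of v: the keys whose node set contains v
def pvKids (graph : List (String × List String)) (v : String) : List String :=
  (graph.filter (fun p => p.2.contains v)).map (fun p => p.1)

def pvStep (graph : List (String × List String)) (S : List String) : List String :=
  PySem.Set.update S (S.flatMap (pvKids graph))

-- nodes reachable from v in ≥ 1 traversal steps (saturates within length+1 iterations)
def pvReach (graph : List (String × List String)) (v : String) : List String :=
  (pvStep graph)^[graph.length + 1] (pvKids graph v)

-- nodes reachable from start in ≥ 0 steps
def pvReachFrom (graph : List (String × List String)) (start : String) : List String :=
  (pvStep graph)^[graph.length + 1] [start]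

-- Pre_ excludes (i) association lists with duplicate dict keys or duplicate elements inside a
-- value set — such lists represent no Python dict/set input — and (ii) graphs with a directed
-- cycle reachable from start in the parent relation, on which A recurses forever (RecursionError).
def Pre_get_all_parents (graph : List (String × List String)) (start : String) (visited : Option (List String)) : Prop :=
  (graph.map (fun p => p.1)).Nodup ∧ (∀ p ∈ graph, p.2.Nodup) ∧
  ∀ v ∈ pvReachFrom graph start, v ∉ pvReach graph v

instance (graph : List (String × List String)) (start : String) (visited : Option (List String)) : Decidable (Pre_get_all_parents graph start visited) := by
  unfold Pre_get_all_parents; infer_instance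

def pvWitness_get_all_parents : (List (String × List String)) × String × Option (List String) :=
  ([("b", ["a"]), ("c", ["b"])], "a", none)

def Spec_get_all_parents (graph : List (String × List String)) (start : String) (visited : Option (List String)) (out : List String) : Prop := out = get_all_parents_alt graph start visited
instance (graph : List (String × List String)) (start : String) (visited : Option (List String)) (out : List String) : Decidable (Spec_get_all_parents graph start visited out) := by unfold Spec_get_all_parents; infer_instance

-- ===== CLAIM (what is proved, stated in full; the proofs are below) =====
def Claim_equal_get_all_parents : Prop := ∀ (graph : List (String × List String)) (start : String) (visited : Option (List String)), Dom_get_all_parents graph start visited → Pre_get_all_parents graph start visited → Spec_get_all_parents graph start visited (get_all_parents graph start visited)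

-- ===== LEMMAS AND PROOFS =====

-- the traversal edge: one step from a to a parent b
def pvEdge (graph : List (String × List String)) (a b : String) : Prop := b ∈ pvKids graph a

-- ---------- small facts ----------
theorem pv_kids_sub_keys {graph : List (String × List String)} {v k : String}
    (h : k ∈ pvKids graph v) : k ∈ graph.map (fun p => p.1) := by
  obtain ⟨p, hp, rfl⟩ := List.mem_map.mp h
  exact List.mem_map.mpr ⟨p, (List.mem_filter.mp hp).1, rfl⟩

theorem pv_nodup_kids {graph : List (String × List String)} (hnd : (graph.map (fun p => p.1)).Nodup)
    (v : String) : (pvKids graph v).Nodup :=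
  hnd.sublist (List.Sublist.map _ List.filter_sublist)

-- A's loop over graph.items() with the membership test is a fold over pvKids
theorem pv_foldA_kids (graph : List (String × List String)) (v : String)
    (f : String → List String → List String) (init : List String) :
    graph.foldl (fun vis p => if p.2.contains v then f p.1 vis else vis) init
      = (pvKids graph v).foldl (fun vis k => f k vis) init := by
  rw [PySem.List.foldl_if_eq_foldl_filter (fun p => p.2.contains v) (fun vis p => f p.1 vis) graph init]
  rw [pvKids, List.foldl_map]

-- ---------- the reverse adjacency list computes pvKids ----------
theorem pv_rev_flat (graph : List (String × List String)) :
    ∀ d0 : PySem.Dict String (List String),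
    graph.foldl (fun d p => p.2.foldl (fun d n => d.modify n [] (fun l => l ++ [p.1])) d) d0
      = (graph.flatMap (fun p => p.2.map (fun n => (n, p.1)))).foldl
          (fun d q => d.modify q.1 [] (fun l => l ++ [q.2])) d0 := by
  induction graph with
  | nil => intro d0; rfl
  | cons p gr ih =>
    intro d0
    simp only [List.foldl_cons, List.flatMap_cons, List.foldl_append, List.foldl_map]
    exact ih _

theorem pv_edges_kids (v : String) : ∀ (graph : List (String × List String)),
    (∀ p ∈ graph, p.2.Nodup) →
    ((graph.flatMap (fun p => p.2.map (fun n => (n, p.1)))).filter (fun q => q.1 == v)).map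
        (fun q => q.2) = pvKids graph v := by
  intro graph
  induction graph with
  | nil => intro _; rfl
  | cons p gr ih =>
    intro hvals
    have hnd : p.2.Nodup := hvals p (by simp)
    simp only [List.flatMap_cons, List.filter_append, List.map_append,
      ih (fun q hq => hvals q (List.mem_cons_of_mem _ hq))]
    have h1 : ((p.2.map (fun n => (n, p.1))).filter (fun q => q.1 == v)).map (fun q => q.2)
        = (p.2.filter (fun n => n == v)).map (fun _ => p.1) := by
      rw [List.filter_map, List.map_map]; rfl
    rw [h1, List.filter_beq]
    by_cases hv : v ∈ p.2
    · rw [List.count_eq_one_of_mem hnd hv]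
      simp [pvKids, hv]
    · rw [List.count_eq_zero_of_not_mem hv]
      simp [pvKids, hv]

theorem pv_rev_getD (graph : List (String × List String)) (hvals : ∀ p ∈ graph, p.2.Nodup)
    (v : String) : (pvRev graph).getD v [] = pvKids graph v := by
  rw [pvRev, pv_rev_flat graph PySem.Dict.empty,
    PySem.Dict.getD_foldl_modify_append]
  have hemp : (PySem.Dict.empty : PySem.Dict String (List String)).getD v [] = [] := rfl
  rw [hemp, List.nil_append]
  exact pv_edges_kids v graph hvals

-- ---------- reachability saturation (for Pre_) ----------
theorem pv_prefix_update (s xs : List String) : s <+: PySem.Set.update s xs := by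
  show s <+: xs.foldl PySem.Set.add s
  induction xs generalizing s with
  | nil => exact List.prefix_rfl
  | cons x xs ih =>
    refine List.IsPrefix.trans ?_ (ih (PySem.Set.add s x))
    unfold PySem.Set.add; split
    · exact List.prefix_rfl
    · exact List.prefix_append s [x]

theorem pv_prefix_step (graph : List (String × List String)) (S : List String) :
    S <+: pvStep graph S := pv_prefix_update S _

theorem pv_mem_step {graph : List (String × List String)} {S : List String} {u k : String}
    (hu : u ∈ S) (hk : k ∈ pvKids graph u) : k ∈ pvStep graph S :=
  (PySem.Set.mem_update _ _ _).mpr (Or.inr (List.mem_flatMap.mpr ⟨u, hu, hk⟩))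

theorem pv_step_sub {graph : List (String × List String)} {S dom : List String} {x : String}
    (hsub : ∀ y ∈ S, y ∈ dom) (hkeys : ∀ y ∈ graph.map (fun p => p.1), y ∈ dom)
    (hx : x ∈ pvStep graph S) : x ∈ dom := by
  rcases (PySem.Set.mem_update _ _ _).mp hx with h | h
  · exact hsub _ h
  · obtain ⟨u, _, hxk⟩ := List.mem_flatMap.mp h
    exact hkeys _ (pv_kids_sub_keys hxk)

theorem pv_prefix_iterate (graph : List (String × List String)) (S : List String) (n : Nat) :
    S <+: (pvStep graph)^[n] S := by
  induction n with
  | zero => exact List.prefix_rfl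
  | succ n ih =>
    rw [Function.iterate_succ_apply']
    exact ih.trans (pv_prefix_step graph _)

theorem pv_nodup_length_le {l dom : List String} (h : l.Nodup) (hs : ∀ y ∈ l, y ∈ dom) :
    l.length ≤ dom.toFinset.card := by
  rw [← List.toFinset_card_of_nodup h]
  exact Finset.card_le_card (fun a ha => List.mem_toFinset.mpr (hs a (List.mem_toFinset.mp ha)))

-- after enough iterations the reach set is a fixed point
theorem pv_exists_fix (graph : List (String × List String)) {dom : List String}
    (hkeys : ∀ y ∈ graph.map (fun p => p.1), y ∈ dom) :
    ∀ (N : Nat) (S : List String), S.Nodup → (∀ y ∈ S, y ∈ dom) →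
    dom.toFinset.card ≤ S.length + N →
    pvStep graph ((pvStep graph)^[N] S) = (pvStep graph)^[N] S := by
  intro N
  induction N with
  | zero =>
    intro S hnd hsub hN
    have hpre := pv_prefix_step graph S
    have hlen : (pvStep graph S).length ≤ S.length :=
      le_trans (pv_nodup_length_le (PySem.Set.nodup_update _ _ hnd)
        (fun y hy => pv_step_sub hsub hkeys hy)) (by simpa using hN)
    simpa using (hpre.eq_of_length_le hlen).symm
  | succ N ih =>
    intro S hnd hsub hN
    by_cases hfx : pvStep graph S = S
    · rw [Function.iterate_fixed hfx]; exact hfx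
    · have hlt : S.length + 1 ≤ (pvStep graph S).length := by
        rcases Nat.lt_or_ge S.length (pvStep graph S).length with h1 | h1
        · omega
        · exact absurd ((pv_prefix_step graph S).eq_of_length_le h1).symm hfx
      rw [Function.iterate_succ_apply]
      exact ih (pvStep graph S) (PySem.Set.nodup_update _ _ hnd)
        (fun y hy => pv_step_sub hsub hkeys hy) (by omega)

-- everything TransGen-reachable lands in a fixed point containing the seed's kids
theorem pv_transGen_mem_fix {graph : List (String × List String)} {F : List String} {v : String}
    (hfix : pvStep graph F = F) (hseed : ∀ k ∈ pvKids graph v, k ∈ F) :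
    ∀ w, Relation.TransGen (pvEdge graph) v w → w ∈ F := by
  intro w h
  induction h with
  | single h => exact hseed _ h
  | tail _ h2 ih => exact hfix ▸ pv_mem_step ih h2

-- Pre_ implies: no node reachable from start lies on a cycle
theorem pv_pre_noCycle {graph : List (String × List String)} {start : String}
    {visited : Option (List String)} (hpre : Pre_get_all_parents graph start visited) :
    ∀ u, Relation.ReflTransGen (pvEdge graph) start u → ¬ Relation.TransGen (pvEdge graph) u u := by
  obtain ⟨h1, _, h3⟩ := hpre
  intro u hru hcyc
  -- the saturated reach set from start is a fixed point
  have hkeys1 : ∀ y ∈ graph.map (fun p => p.1), y ∈ start :: graph.map (fun p => p.1) :=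
    fun y hy => List.mem_cons_of_mem _ hy
  have hfix1 : pvStep graph (pvReachFrom graph start) = pvReachFrom graph start := by
    refine pv_exists_fix graph hkeys1 (graph.length + 1) [start] (by simp) (by simp) ?_
    calc (start :: graph.map (fun p => p.1)).toFinset.card
        ≤ (start :: graph.map (fun p => p.1)).length := List.toFinset_card_le _
      _ = graph.length + 1 := by simp
      _ ≤ [start].length + (graph.length + 1) := by simp
  have hstart : start ∈ pvReachFrom graph start :=
    (pv_prefix_iterate graph [start] _).subset (by simp)
  have hclosed : ∀ a ∈ pvReachFrom graph start, ∀ k ∈ pvKids graph a, k ∈ pvReachFrom graph start :=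
    fun a ha k hk => hfix1 ▸ pv_mem_step ha hk
  have hallF : ∀ w, Relation.ReflTransGen (pvEdge graph) start w → w ∈ pvReachFrom graph start := by
    intro w hw
    induction hw with
    | refl => exact hstart
    | tail _ h2 ih => exact hclosed _ ih _ h2
  have huF : u ∈ pvReachFrom graph start := hallF u hru
  -- the saturated reach set of u's kids is a fixed point containing the cycle
  have hkeys2 : ∀ y ∈ graph.map (fun p => p.1), y ∈ u :: graph.map (fun p => p.1) :=
    fun y hy => List.mem_cons_of_mem _ hy
  have hfix2 : pvStep graph (pvReach graph u) = pvReach graph u := by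
    refine pv_exists_fix graph hkeys2 (graph.length + 1) (pvKids graph u)
      (pv_nodup_kids h1 u) (fun y hy => List.mem_cons_of_mem _ (pv_kids_sub_keys hy)) ?_
    calc (u :: graph.map (fun p => p.1)).toFinset.card
        ≤ (u :: graph.map (fun p => p.1)).length := List.toFinset_card_le _
      _ = graph.length + 1 := by simp
      _ ≤ (pvKids graph u).length + (graph.length + 1) := by simp
  have := pv_transGen_mem_fix hfix2
    (fun k hk => (pv_prefix_iterate graph (pvKids graph u) _).subset hk) u hcyc
  exact h3 u huF this

-- ---------- the cardinality measures ----------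
noncomputable def pvUcard (graph : List (String × List String)) (v : String) : Nat :=
  {w | Relation.ReflTransGen (pvEdge graph) v w}.ncard

theorem pv_U_sub (graph : List (String × List String)) (v : String) :
    {w | Relation.ReflTransGen (pvEdge graph) v w}
      ⊆ ↑(insert v ((graph.map (fun p => p.1)).toFinset)) := by
  intro w hw
  rcases hw.cases_tail with rfl | ⟨c, _, hcw⟩
  · simp
  · simp only [Finset.coe_insert, Set.mem_insert_iff, Finset.mem_coe, List.mem_toFinset]
    exact Or.inr (pv_kids_sub_keys hcw)

theorem pv_U_fin (graph : List (String × List String)) (v : String) :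
    {w | Relation.ReflTransGen (pvEdge graph) v w}.Finite :=
  Set.Finite.subset (Finset.finite_toSet _) (pv_U_sub graph v)

theorem pv_Ucard_pos (graph : List (String × List String)) (v : String) : 1 ≤ pvUcard graph v :=
  (Set.ncard_pos (pv_U_fin graph v)).mpr ⟨v, Relation.ReflTransGen.refl⟩

theorem pv_Ucard_lt {graph : List (String × List String)} {v k : String}
    (hNC : ¬ Relation.TransGen (pvEdge graph) v v) (hk : pvEdge graph v k) :
    pvUcard graph k < pvUcard graph v := by
  apply Set.ncard_lt_ncard _ (pv_U_fin graph v)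
  rw [Set.ssubset_def]
  constructor
  · intro w hw
    exact Relation.ReflTransGen.head hk hw
  · intro hsup
    exact hNC (Relation.TransGen.head' hk (hsup Relation.ReflTransGen.refl))

theorem pv_Ucard_le (graph : List (String × List String)) (v : String) :
    pvUcard graph v ≤ graph.length + 1 := by
  have h1 := Set.ncard_le_ncard (pv_U_sub graph v) (Finset.finite_toSet _)
  rw [Set.ncard_coe_finset] at h1
  have h2 := Finset.card_insert_le v ((graph.map (fun p => p.1)).toFinset)
  have h3 := List.toFinset_card_le (graph.map (fun p => p.1))
  have h4 : (graph.map (fun p => p.1)).length = graph.length := List.length_map _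
  rw [pvUcard]
  omega

-- ---------- A absorbs an already fully visited region ----------
theorem pv_absorb (graph : List (String × List String)) :
    ∀ (fuel : Nat) (v : String) (visited : List String),
    (∀ w, Relation.ReflTransGen (pvEdge graph) v w → w ∈ visited) →
    pvGoA graph fuel v visited = visited := by
  intro fuel
  induction fuel with
  | zero => intro v visited _; rfl
  | succ n ih =>
    intro v visited h
    show graph.foldl (fun vis p => if p.2.contains v then pvGoA graph n p.1 vis else vis)
        (PySem.Set.add visited v) = visited
    rw [PySem.Set.add_of_mem (h v Relation.ReflTransGen.refl)]
    rw [pv_foldA_kids graph v (fun k vis => pvGoA graph n k vis) visited]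
    have hfold : ∀ cs : List String, (∀ k ∈ cs, pvEdge graph v k) →
        cs.foldl (fun vis k => pvGoA graph n k vis) visited = visited := by
      intro cs
      induction cs with
      | nil => intro _; rfl
      | cons k cs ihc =>
        intro hcs
        simp only [List.foldl_cons]
        rw [ih k visited (fun w hw => h w ((Relation.ReflTransGen.single (hcs k (by simp))).trans hw))]
        exact ihc (fun x hx => hcs x (List.mem_cons_of_mem _ hx))
    exact hfold _ (fun k hk => hk)

-- ---------- the main simulation lemma ----------
theorem pv_main (graph : List (String × List String)) (start : String)
    (rev : PySem.Dict String (List String))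
    (hrev : ∀ x, rev.getD x [] = pvKids graph x)
    (hNC : ∀ u, Relation.ReflTransGen (pvEdge graph) start u → ¬ Relation.TransGen (pvEdge graph) u u) :
    ∀ (fuelA : Nat) (v : String) (g seen visited : List String) (fuelB : Nat),
    Relation.ReflTransGen (pvEdge graph) start v →
    pvUcard graph v ≤ fuelA →
    ((insert v ((graph.map (fun p => p.1)).toFinset)).filter (fun k => k ∉ seen)).card < fuelB →
    (∀ u ∈ seen, u ∈ visited) →
    (∀ u ∈ seen, u ∈ g ∨ ∀ k ∈ pvKids graph u, k ∈ seen) →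
    (∀ u ∈ g, Relation.TransGen (pvEdge graph) u v ∧ Relation.ReflTransGen (pvEdge graph) start u) →
    pvGoA graph fuelA v visited = (pvGoB rev fuelB v (seen, visited)).2 ∧
    (∀ u ∈ seen, u ∈ (pvGoB rev fuelB v (seen, visited)).1) ∧
    v ∈ (pvGoB rev fuelB v (seen, visited)).1 ∧
    (∀ u ∈ (pvGoB rev fuelB v (seen, visited)).1, u ∈ (pvGoB rev fuelB v (seen, visited)).2) ∧
    (∀ u ∈ (pvGoB rev fuelB v (seen, visited)).1,
      u ∈ g ∨ ∀ k ∈ pvKids graph u, k ∈ (pvGoB rev fuelB v (seen, visited)).1) := by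
  intro fuelA
  induction fuelA with
  | zero =>
    intro v g seen visited fuelB hv hA hB hsv hcl hg
    exact absurd (le_trans (pv_Ucard_pos graph v) hA) (by omega)
  | succ fA ih =>
    intro v g seen visited fuelB hv hA hB hsv hcl hg
    obtain ⟨fB, rfl⟩ : ∃ fB, fuelB = fB + 1 := ⟨fuelB - 1, by omega⟩
    by_cases hvs : v ∈ seen
    · -- v already seen: B skips, A re-walks a region that is entirely inside visited
      have hrB : pvGoB rev (fB+1) v (seen, visited) = (seen, visited) := by
        simp only [pvGoB]
        rw [if_pos (List.contains_iff_mem.mpr hvs)]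
      have hseenR : ∀ w, Relation.ReflTransGen (pvEdge graph) v w → w ∈ seen := by
        intro w hw
        induction hw with
        | refl => exact hvs
        | tail h1 h2 ih2 =>
          rcases hcl _ ih2 with hgmem | hclosed
          · obtain ⟨ht, hs⟩ := hg _ hgmem
            exact absurd (Relation.TransGen.trans_left ht h1) (hNC _ hs)
          · exact hclosed _ h2
      have hA1 : pvGoA graph (fA+1) v visited = visited :=
        pv_absorb graph _ v visited (fun w hw => hsv _ (hseenR w hw))
      rw [hrB]
      exact ⟨hA1, fun u hu => hu, hvs, hsv, hcl⟩
    · -- v unseen: both sides walk the kids of v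
      have hBunfold : pvGoB rev (fB+1) v (seen, visited)
          = (pvKids graph v).foldl (fun sv p => pvGoB rev fB p sv)
              (PySem.Set.add seen v, PySem.Set.add visited v) := by
        simp only [pvGoB]
        rw [if_neg (fun h => hvs (List.contains_iff_mem.mp h)), hrev]
      have hAunfold : pvGoA graph (fA+1) v visited
          = (pvKids graph v).foldl (fun vis k => pvGoA graph fA k vis) (PySem.Set.add visited v) :=
        pv_foldA_kids graph v (fun k vis => pvGoA graph fA k vis) _
      have hA' : pvUcard graph v ≤ fA + 1 := hA
      have hlist : ∀ (cs : List String) (seen1 vis1 : List String),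
          (∀ k ∈ cs, pvEdge graph v k) →
          (∀ u ∈ seen1, u ∈ vis1) →
          (∀ u ∈ seen1, u ∈ g ++ [v] ∨ ∀ k ∈ pvKids graph u, k ∈ seen1) →
          v ∈ seen1 →
          (((graph.map (fun p => p.1)).toFinset).filter (fun k => k ∉ seen1)).card < fB →
          cs.foldl (fun vis k => pvGoA graph fA k vis) vis1
            = (cs.foldl (fun sv p => pvGoB rev fB p sv) (seen1, vis1)).2 ∧
          (∀ u ∈ seen1, u ∈ (cs.foldl (fun sv p => pvGoB rev fB p sv) (seen1, vis1)).1) ∧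
          (∀ k ∈ cs, k ∈ (cs.foldl (fun sv p => pvGoB rev fB p sv) (seen1, vis1)).1) ∧
          (∀ u ∈ (cs.foldl (fun sv p => pvGoB rev fB p sv) (seen1, vis1)).1,
            u ∈ (cs.foldl (fun sv p => pvGoB rev fB p sv) (seen1, vis1)).2) ∧
          (∀ u ∈ (cs.foldl (fun sv p => pvGoB rev fB p sv) (seen1, vis1)).1,
            u ∈ g ++ [v] ∨ ∀ k ∈ pvKids graph u,
              k ∈ (cs.foldl (fun sv p => pvGoB rev fB p sv) (seen1, vis1)).1) ∧
          v ∈ (cs.foldl (fun sv p => pvGoB rev fB p sv) (seen1, vis1)).1 := by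
        intro cs
        induction cs with
        | nil =>
          intro seen1 vis1 _ hsv1 hcl1 hvseen1 hB1
          exact ⟨rfl, fun u hu => hu, by simp, hsv1, hcl1, hvseen1⟩
        | cons k cs ihc =>
          intro seen1 vis1 hcs hsv1 hcl1 hvseen1 hB1
          have hek : pvEdge graph v k := hcs k (by simp)
          have hkkeys : k ∈ graph.map (fun p => p.1) := pv_kids_sub_keys hek
          have hvk : Relation.ReflTransGen (pvEdge graph) start k := hv.tail hek
          have hAk : pvUcard graph k ≤ fA := by
            have := pv_Ucard_lt (hNC v hv) hek
            omega
          have hBk : ((insert k ((graph.map (fun p => p.1)).toFinset)).filter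
              (fun x => x ∉ seen1)).card < fB := by
            rw [Finset.insert_eq_self.mpr (List.mem_toFinset.mpr hkkeys)]
            exact hB1
          have hgk : ∀ u ∈ g ++ [v],
              Relation.TransGen (pvEdge graph) u k ∧
              Relation.ReflTransGen (pvEdge graph) start u := by
            intro u hu
            rcases List.mem_append.mp hu with hu | hu
            · obtain ⟨ht, hs⟩ := hg u hu
              exact ⟨ht.tail hek, hs⟩
            · rw [List.mem_singleton.mp hu]
              exact ⟨Relation.TransGen.single hek, hv⟩
          obtain ⟨e1, e2, e3, e4, e5⟩ :=
            ih k (g ++ [v]) seen1 vis1 fB hvk hAk hBk hsv1 hcl1 hgk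
          set r := pvGoB rev fB k (seen1, vis1) with hr
          have hvr : v ∈ r.1 := e2 v hvseen1
          have hcsr : ∀ x ∈ cs, pvEdge graph v x := fun x hx => hcs x (List.mem_cons_of_mem _ hx)
          have hBr : (((graph.map (fun p => p.1)).toFinset).filter (fun x => x ∉ r.1)).card < fB := by
            refine lt_of_le_of_lt (Finset.card_le_card ?_) hB1
            intro x hx
            simp only [Finset.mem_filter] at hx ⊢
            exact ⟨hx.1, fun hmem => hx.2 (e2 x hmem)⟩
          obtain ⟨f1, f2, f3, f4, f5, f6⟩ := ihc r.1 r.2 hcsr e4 e5 hvr hBr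
          refine ⟨?_, ?_, ?_, ?_, ?_, ?_⟩
          · simp only [List.foldl_cons]
            rw [e1]
            simpa using f1
          · intro u hu
            simp only [List.foldl_cons]
            simpa using f2 u (e2 u hu)
          · intro x hx
            simp only [List.foldl_cons]
            rcases List.mem_cons.mp hx with rfl | hx
            · simpa using f2 x e3
            · simpa using f3 x hx
          · simp only [List.foldl_cons]; simpa using f4
          · simp only [List.foldl_cons]; simpa using f5
          · simp only [List.foldl_cons]; simpa using f6
      have hsv1 : ∀ u ∈ PySem.Set.add seen v, u ∈ PySem.Set.add visited v := by
        intro u hu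
        rcases (PySem.Set.mem_add seen v u).mp hu with hu | rfl
        · exact (PySem.Set.mem_add visited v u).mpr (Or.inl (hsv u hu))
        · exact (PySem.Set.mem_add visited u u).mpr (Or.inr rfl)
      have hcl1 : ∀ u ∈ PySem.Set.add seen v,
          u ∈ g ++ [v] ∨ ∀ k ∈ pvKids graph u, k ∈ PySem.Set.add seen v := by
        intro u hu
        rcases (PySem.Set.mem_add seen v u).mp hu with hu | rfl
        · rcases hcl u hu with hgm | hclosed
          · exact Or.inl (List.mem_append.mpr (Or.inl hgm))
          · exact Or.inr (fun k hk => (PySem.Set.mem_add seen v k).mpr (Or.inl (hclosed k hk)))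
        · exact Or.inl (List.mem_append.mpr (Or.inr (by simp)))
      have hvseen1 : v ∈ PySem.Set.add seen v := (PySem.Set.mem_add seen v v).mpr (Or.inr rfl)
      have hB1 : (((graph.map (fun p => p.1)).toFinset).filter
          (fun k => k ∉ PySem.Set.add seen v)).card < fB := by
        have hvT : v ∈ (insert v ((graph.map (fun p => p.1)).toFinset)).filter
            (fun k => k ∉ seen) :=
          Finset.mem_filter.mpr ⟨Finset.mem_insert_self v _, hvs⟩
        have hsubT : ((graph.map (fun p => p.1)).toFinset).filter
              (fun k => k ∉ PySem.Set.add seen v)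
            ⊆ ((insert v ((graph.map (fun p => p.1)).toFinset)).filter (fun k => k ∉ seen)) := by
          intro x hx
          simp only [Finset.mem_filter, Finset.mem_insert] at hx ⊢
          refine ⟨Or.inr hx.1, fun hxs => hx.2 ((PySem.Set.mem_add seen v x).mpr (Or.inl hxs))⟩
        have hvnot : v ∉ ((graph.map (fun p => p.1)).toFinset).filter
            (fun k => k ∉ PySem.Set.add seen v) := by
          simp only [Finset.mem_filter]
          exact fun h => h.2 hvseen1
        have hss : ((graph.map (fun p => p.1)).toFinset).filter
              (fun k => k ∉ PySem.Set.add seen v)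
            ⊂ ((insert v ((graph.map (fun p => p.1)).toFinset)).filter (fun k => k ∉ seen)) := by
          rw [Finset.ssubset_def]
          exact ⟨hsubT, fun hsup => hvnot (hsup hvT)⟩
        have := Finset.card_lt_card hss
        omega
      obtain ⟨c1, c2, c3, c4, c5, c6⟩ :=
        hlist (pvKids graph v) (PySem.Set.add seen v) (PySem.Set.add visited v)
          (fun k hk => hk) hsv1 hcl1 hvseen1 hB1
      rw [hBunfold, hAunfold]
      refine ⟨c1, ?_, c6, c4, ?_⟩
      · intro u hu
        exact c2 u ((PySem.Set.mem_add seen v u).mpr (Or.inl hu))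
      · intro u hu
        rcases c5 u hu with hgm | hclosed
        · rcases List.mem_append.mp hgm with hgm | hgm
          · exact Or.inl hgm
          · rw [List.mem_singleton.mp hgm]
            exact Or.inr c3
        · exact Or.inr hclosed

-- ===== VERDICT (by name: the statement is the Claim_ definition above) =====
theorem get_all_parents_spec : Claim_equal_get_all_parents := by
  intro graph start visited _ hpre
  unfold Spec_get_all_parents get_all_parents get_all_parents_alt
  have hrev := pv_rev_getD graph hpre.2.1
  have hNC := pv_pre_noCycle hpre
  have hB : ((insert start ((graph.map (fun p => p.1)).toFinset)).filter
      (fun k => k ∉ ([] : List String))).card < graph.length + 2 := by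
    calc _ ≤ (insert start ((graph.map (fun p => p.1)).toFinset)).card := Finset.card_filter_le _ _
      _ ≤ ((graph.map (fun p => p.1)).toFinset).card + 1 := Finset.card_insert_le _ _
      _ ≤ (graph.map (fun p => p.1)).length + 1 :=
          Nat.add_le_add_right (List.toFinset_card_le _) 1
      _ < graph.length + 2 := by simp
  exact (pv_main graph start (pvRev graph) hrev hNC (graph.length + 1) start [] []
    (visited.getD []) (graph.length + 2) Relation.ReflTransGen.refl
    (pv_Ucard_le graph start) hB (by simp) (by simp) (by simp)).1
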